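-- pv_equiv track=rewrite | github.com/S00ahKim/algorithm-python | camouflage.py | solution
-- ===== SOURCE A (Python) =====
-- def solution(clothes):
--     answer = 1
--     closet = dict()
--
--     for c in clothes:
--         if c[1] not in closet.keys():
--             closet[c[1]] = []
--         closet[c[1]].append(c[0])
--
--     for key in closet.keys():
--         answer *= len(closet[key]) + 1
--
--     return answer-1
-- ===== SOURCE B (Python) =====
-- def solution(clothes):
--     # Sort by category, then scan adjacent runs of equal categories:
--     # multiply (run length + 1) over the runs, minus one for the "wear nothing" case.
--     s = sorted(clothes, key=lambda c: c[1])
--     answer = 1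
--     i = 0
--     n = len(s)
--     while i < n:
--         j = i + 1
--         while j < n and s[j][1] == s[i][1]:
--             j += 1
--         answer *= (j - i) + 1
--         i = j
--     return answer - 1
-- ===== Notes on version B (the rewrite author's own statement) =====
-- stated objective: alternative
-- what changed: Replaced the dict-of-lists grouping (build category->items map, then multiply sizes) by sort-by-category followed by a single adjacent-run scan that multiplies (run length + 1) on the fly.
import Mathlib
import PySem

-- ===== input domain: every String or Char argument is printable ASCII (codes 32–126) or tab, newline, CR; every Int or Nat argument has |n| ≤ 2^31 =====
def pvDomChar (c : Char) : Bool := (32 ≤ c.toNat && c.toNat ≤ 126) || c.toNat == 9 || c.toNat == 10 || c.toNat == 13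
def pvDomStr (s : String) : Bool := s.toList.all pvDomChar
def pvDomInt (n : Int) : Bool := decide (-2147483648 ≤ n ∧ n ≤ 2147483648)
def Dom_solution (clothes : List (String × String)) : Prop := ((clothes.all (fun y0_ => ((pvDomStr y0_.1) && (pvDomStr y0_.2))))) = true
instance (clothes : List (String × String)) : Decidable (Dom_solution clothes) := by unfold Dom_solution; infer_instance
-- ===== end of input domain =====

-- B replaces A's dict-of-lists grouping by sort-by-category plus one adjacent-run scan (alternative decomposition, same result).

-- ===== PORT A =====
-- A: build closet : dict category -> list of names, then multiply (len+1) over the keys, minus 1.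
def solution (clothes : List (String × String)) : Int :=
  let closet : PySem.Dict String (List String) :=
    clothes.foldl (fun d c =>
      let d := if d.contains c.2 then d else d.insert c.2 []
      d.insert c.2 (d.getD c.2 [] ++ [c.1])) PySem.Dict.empty
  let answer : Int := closet.keys.foldl (fun a k => a * (((closet.getD k []).length : Int) + 1)) 1
  answer - 1

-- ===== PORT B =====
-- B's outer while over the sorted list; the inner while (advance j through the run of
-- s[i]'s category) is the takeWhile/dropWhile split of the tail.
def bLoop : List (String × String) → Int → Int
  | [], ans => ans
  | c :: rest, ans =>
      bLoop (rest.dropWhile (fun x => x.2 == c.2))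
            (ans * (((rest.takeWhile (fun x => x.2 == c.2)).length : Int) + 2))
  termination_by l => l.length
  decreasing_by
    simpa using Nat.lt_succ_of_le (List.length_dropWhile_le (fun x => x.2 == c.2) rest)

def solution_alt (clothes : List (String × String)) : Int :=
  bLoop (PySem.List.sorted clothes (fun c => c.2) false) 1 - 1

-- ===== PRECONDITION & SPEC =====
def Spec_solution (clothes : List (String × String)) (out : Int) : Prop := out = solution_alt clothes
instance (clothes : List (String × String)) (out : Int) : Decidable (Spec_solution clothes out) := by unfold Spec_solution; infer_instance

-- ===== CLAIM (what is proved, stated in full; the proofs are below) =====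
def Claim_equal_solution : Prop := ∀ (clothes : List (String × String)), Dom_solution clothes → Spec_solution clothes (solution clothes)

-- ===== LEMMAS AND PROOFS =====

-- the common value: product of (multiplicity + 1) over the set of categories
def catProd (m : List String) : Int :=
  ∏ k ∈ m.toFinset, ((m.count k : Int) + 1)

theorem catProd_perm (m m' : List String) (h : m.Perm m') : catProd m = catProd m' := by
  unfold catProd
  rw [show m.toFinset = m'.toFinset from Finset.ext fun k => by
    simp [List.mem_toFinset, h.mem_iff]]
  exact Finset.prod_congr rfl fun k _ => by rw [h.count_eq]

theorem foldl_mul (l : List String) (g : String → Int) (a : Int) :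
    l.foldl (fun a k => a * g k) a = a * (l.map g).prod := by
  induction l generalizing a with
  | nil => simp
  | cons x t ih => simp [List.foldl_cons, ih, mul_assoc]

-- A's loop body equals a single Dict.modify step
theorem stepA_eq_modify (d : PySem.Dict String (List String)) (c : String × String) :
    (let d' := if d.contains c.2 then d else d.insert c.2 []
     d'.insert c.2 (d'.getD c.2 [] ++ [c.1])) = d.modify c.2 [] (· ++ [c.1]) := by
  by_cases h : d.contains c.2 = true
  · simp [h, PySem.Dict.modify]
  · simp only [Bool.not_eq_true] at h
    have hg : d.getD c.2 [] = [] := PySem.Dict.getD_of_not_contains d [] h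
    simp [h, PySem.Dict.modify, hg, PySem.Dict.getD_insert_self, PySem.Dict.insert_insert_self]

theorem solution_eq_catProd (clothes : List (String × String)) :
    solution clothes = catProd (clothes.map (fun c => c.2)) - 1 := by
  unfold solution
  have hfold :
      clothes.foldl (fun d c =>
        let d := if d.contains c.2 then d else d.insert c.2 []
        d.insert c.2 (d.getD c.2 [] ++ [c.1])) PySem.Dict.empty
      = clothes.foldl (fun d c => d.modify c.2 [] (· ++ [c.1])) PySem.Dict.empty := by
    congr 1
    funext d c
    exact stepA_eq_modify d c
  rw [hfold]
  set m := clothes.map (fun c => c.2) with hm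
  set closet := clothes.foldl (fun d c => d.modify c.2 [] (· ++ [c.1])) PySem.Dict.empty with hc
  have hkeys : closet.keys = PySem.Set.ofList m := by
    rw [hc, PySem.Dict.keys_foldl_modify_key clothes (fun c => c.2) [] (fun _ c => (· ++ [c.1]))]
    simp [PySem.Dict.keys_empty]
    rfl
  have hgetD : ∀ k, (closet.getD k []).length = m.count k := by
    intro k
    have hswap : closet = (clothes.map (fun c => (c.2, c.1))).foldl
        (fun d p => d.modify p.1 [] (· ++ [p.2])) PySem.Dict.empty := by
      rw [hc, List.foldl_map]
    rw [hswap, PySem.Dict.getD_foldl_modify_append]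
    simp only [PySem.Dict.getD_empty, List.nil_append, List.length_map, hm,
      List.count_eq_countP, List.countP_map, ← List.countP_eq_length_filter]
    rfl
  have hnd : closet.keys.Nodup := by rw [hkeys]; exact PySem.Set.nodup_ofList m
  have htf : closet.keys.toFinset = m.toFinset := by
    apply Finset.ext; intro k
    simp [List.mem_toFinset, hkeys, PySem.Set.mem_ofList]
  show closet.keys.foldl (fun a k => a * (((closet.getD k []).length : Int) + 1)) 1 - 1
      = catProd m - 1
  rw [foldl_mul, one_mul]
  have : (closet.keys.map (fun k => (((closet.getD k []).length : Int) + 1))).prod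
      = catProd m := by
    rw [← List.prod_toFinset _ hnd, htf]
    unfold catProd
    exact Finset.prod_congr rfl fun k _ => by rw [hgetD k]
  rw [this]

-- on a key-sorted tail whose elements are all ≥ k, nothing past the dropWhile has key k
theorem dropWhile_ne (k : String) (r : List (String × String))
    (hp : (r.map (fun x => x.2)).Pairwise (· ≤ ·))
    (hge : ∀ x ∈ r, k ≤ x.2) :
    ∀ x ∈ r.dropWhile (fun x => x.2 == k), x.2 ≠ k := by
  induction r with
  | nil => simp
  | cons y r' ih =>
    simp only [List.map_cons, List.pairwise_cons] at hp
    by_cases hy : y.2 = k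
    · rw [List.dropWhile_cons_of_pos (by simp [hy])]
      exact ih hp.2 fun x hx => hge x (List.mem_cons_of_mem _ hx)
    · rw [List.dropWhile_cons_of_neg (by simp [hy])]
      intro x hx
      rcases List.mem_cons.mp hx with h | h
      · subst h; exact hy
      · have h1 : y.2 ≤ x.2 := hp.1 x.2 (List.mem_map_of_mem h)
        have h2 : k ≤ y.2 := hge y (List.mem_cons_self)
        intro hxk
        exact hy (le_antisymm (hxk ▸ h1) h2)

theorem catProd_sorted_cons (c : String × String) (rest : List (String × String))
    (hp : ((c :: rest).map (fun x => x.2)).Pairwise (· ≤ ·)) :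
    catProd ((c :: rest).map (fun x => x.2))
      = (((rest.takeWhile (fun x => x.2 == c.2)).length : Int) + 2)
        * catProd ((rest.dropWhile (fun x => x.2 == c.2)).map (fun x => x.2)) := by
  set q : String × String → Bool := fun x => x.2 == c.2 with hq
  set t := rest.takeWhile q with ht
  set dd := rest.dropWhile q with hd
  have hsplit : t ++ dd = rest := List.takeWhile_append_dropWhile
  simp only [List.map_cons, List.pairwise_cons] at hp
  have hge : ∀ x ∈ rest, c.2 ≤ x.2 := fun x hx => hp.1 x.2 (List.mem_map_of_mem hx)
  have htk : ∀ x ∈ t, x.2 = c.2 := fun x hx => by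
    have := List.mem_takeWhile_imp hx; simpa [hq] using this
  have hdd : ∀ x ∈ dd, x.2 ≠ c.2 := dropWhile_ne c.2 rest hp.2 hge
  have hddk : c.2 ∉ dd.map (fun x => x.2) := by
    intro hmem
    rcases List.mem_map.mp hmem with ⟨x, hx, hx2⟩
    exact hdd x hx hx2
  set m := (c :: rest).map (fun x => x.2) with hm
  have hmdecomp : m = c.2 :: (t.map (fun x => x.2) ++ dd.map (fun x => x.2)) := by
    rw [hm, List.map_cons, ← hsplit, List.map_append]
  have htrep : t.map (fun x => x.2) = List.replicate t.length c.2 := by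
    rw [List.eq_replicate_iff]
    constructor
    · simp
    · intro b hb
      rcases List.mem_map.mp hb with ⟨x, hx, hx2⟩
      rw [← hx2]; exact htk x hx
  -- toFinset of m
  have htf : m.toFinset = insert c.2 (dd.map (fun x => x.2)).toFinset := by
    apply Finset.ext; intro k
    simp only [List.mem_toFinset, Finset.mem_insert, hmdecomp, List.mem_cons, List.mem_append,
      htrep, List.mem_replicate]
    tauto
  have hnotmem : c.2 ∉ (dd.map (fun x => x.2)).toFinset := by
    simpa [List.mem_toFinset] using hddk
  -- counts
  have hcount_c : m.count c.2 = t.length + 1 := by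
    rw [hmdecomp, List.count_cons_self, List.count_append, htrep, List.count_replicate]
    simp [List.count_eq_zero.mpr hddk]
  have hcount_k : ∀ k ∈ (dd.map (fun x => x.2)).toFinset,
      m.count k = (dd.map (fun x => x.2)).count k := by
    intro k hk
    have hkne : k ≠ c.2 := fun h => hnotmem (h ▸ hk)
    rw [hmdecomp, List.count_cons_of_ne (Ne.symm hkne), List.count_append, htrep, List.count_replicate]
    simp [hkne.symm]
  unfold catProd
  rw [htf, Finset.prod_insert hnotmem, hcount_c]
  have hrest : ∏ k ∈ (dd.map (fun x => x.2)).toFinset, ((m.count k : Int) + 1)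
      = ∏ k ∈ (dd.map (fun x => x.2)).toFinset, (((dd.map (fun x => x.2)).count k : Int) + 1) :=
    Finset.prod_congr rfl fun k hk => by rw [hcount_k k hk]
  rw [hrest]
  push_cast
  ring

-- bLoop on a key-sorted list multiplies the accumulator by catProd of its keys
theorem bLoop_eq (n : Nat) : ∀ (l : List (String × String)), l.length ≤ n →
    ((l.map (fun x => x.2)).Pairwise (· ≤ ·)) → ∀ a : Int,
    bLoop l a = a * catProd (l.map (fun x => x.2)) := by
  induction n with
  | zero =>
    intro l hl _ a
    rw [List.length_eq_zero_iff.mp (Nat.le_zero.mp hl)]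
    simp [bLoop, catProd]
  | succ n ih =>
    intro l hl hp a
    match l with
    | [] => simp [bLoop, catProd]
    | c :: rest =>
      rw [bLoop]
      have hlen : (rest.dropWhile (fun x => x.2 == c.2)).length ≤ n := by
        have h1 := List.length_dropWhile_le (fun x => x.2 == c.2) rest
        simp only [List.length_cons] at hl
        omega
      have hpd : ((rest.dropWhile (fun x => x.2 == c.2)).map (fun x => x.2)).Pairwise (· ≤ ·) := by
        simp only [List.map_cons, List.pairwise_cons] at hp
        exact List.Pairwise.sublist ((rest.dropWhile_sublist (p := fun x => x.2 == c.2)).map (fun x => x.2)) hp.2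
      rw [ih _ hlen hpd, catProd_sorted_cons c rest hp]
      ring

-- ===== VERDICT (by name: the statement is the Claim_ definition above) =====
theorem solution_spec : Claim_equal_solution := by
  intro clothes _
  unfold Spec_solution solution_alt
  rw [solution_eq_catProd,
    bLoop_eq (PySem.List.sorted clothes (fun c => c.2) false).length _ le_rfl
      (PySem.List.sorted_map_key_pairwise clothes (fun c => c.2)), one_mul]
  congr 1
  exact catProd_perm _ _ ((PySem.List.sorted_perm clothes (fun c => c.2) false).map _).symm
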